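-- pv_equiv track=rewrite | github.com/yuzuki-aritomo/Atcoder | 2021-03-27/Moon.py | calc
-- ===== SOURCE A (Python) =====
-- def calc(B, x, y):
--     ans = 0
--     for i in range(len(B)-1):
--         if(B[i]=='C' and B[i+1]=='J'):
--             ans += x
--         if(B[i]=='J' and B[i+1]=='C'):
--             ans += y
--     return ans
-- ===== SOURCE B (Python) =====
-- def calc(B, x, y):
--     # Stage 1: run-length collapse - keep one representative per maximal
--     # run of equal characters (runs of equal chars contain no CJ/JC pair).
--     runs = []
--     for ch in B:
--         if not runs or runs[-1] != ch:
--             runs.append(ch)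
--     # Stage 2: every boundary between consecutive runs is a pair of
--     # distinct characters; weight the C->J and J->C boundaries.
--     ans = 0
--     for a, b in zip(runs, runs[1:]):
--         if a == 'C' and b == 'J':
--             ans += x
--         elif a == 'J' and b == 'C':
--             ans += y
--     return ans
-- ===== Notes on version B (the rewrite author's own statement) =====
-- stated objective: alternative
-- what changed: B first run-length-collapses the string (one representative per maximal run of equal characters) and then weights only the run boundaries, instead of A's single scan over all adjacent index pairs; correct because CJ/JC pairs consist of distinct characters, so they occur exactly at run boundaries.
import Mathlib
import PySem

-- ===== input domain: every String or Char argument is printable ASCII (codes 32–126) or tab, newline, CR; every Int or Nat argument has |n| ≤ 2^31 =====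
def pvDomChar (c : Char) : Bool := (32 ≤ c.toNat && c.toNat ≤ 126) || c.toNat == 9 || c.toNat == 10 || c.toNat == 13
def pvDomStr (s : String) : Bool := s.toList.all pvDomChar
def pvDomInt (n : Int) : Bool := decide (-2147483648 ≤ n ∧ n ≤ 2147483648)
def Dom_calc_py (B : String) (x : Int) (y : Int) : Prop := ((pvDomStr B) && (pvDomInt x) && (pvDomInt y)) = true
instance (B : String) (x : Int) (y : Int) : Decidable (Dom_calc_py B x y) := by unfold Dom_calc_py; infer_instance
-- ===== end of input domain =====

-- B run-length-collapses the string and weights only the run boundaries,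
-- instead of A's single scan over all adjacent index pairs (alternative; same cost).

-- ===== PORT A =====
-- literal port of A: fold over range(len(B)-1), two independent ifs reading B[i], B[i+1]
def calc_py (B : String) (x : Int) (y : Int) : Int :=
  (PySem.List.pyRange 0 (PySem.Str.len B - 1) 1).foldl
    (fun ans i =>
      let ans := if PySem.Str.pyGet? B i = some 'C' ∧ PySem.Str.pyGet? B (i + 1) = some 'J'
                 then ans + x else ans
      if PySem.Str.pyGet? B i = some 'J' ∧ PySem.Str.pyGet? B (i + 1) = some 'C'
      then ans + y else ans)
    0

-- ===== PORT B =====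
-- literal port of Source B: stage 1 builds `runs` (one representative per maximal run
-- of equal characters) by the same append-at-end loop; stage 2 folds over
-- zip(runs, runs[1:]) with the same if/elif chain.
def calc_py_alt (B : String) (x : Int) (y : Int) : Int :=
  let runs := B.toList.foldl
    (fun runs ch => if runs = [] ∨ runs.getLast? ≠ some ch then runs ++ [ch] else runs) []
  (runs.zip (PySem.List.slice runs (some 1) none)).foldl
    (fun ans p =>
      if p.1 = 'C' ∧ p.2 = 'J' then ans + x
      else if p.1 = 'J' ∧ p.2 = 'C' then ans + y
      else ans) 0

-- ===== PRECONDITION & SPEC =====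
def Spec_calc_py (B : String) (x : Int) (y : Int) (out : Int) : Prop := out = calc_py_alt B x y
instance (B : String) (x : Int) (y : Int) (out : Int) : Decidable (Spec_calc_py B x y out) := by unfold Spec_calc_py; infer_instance

-- ===== CLAIM (what is proved, stated in full; the proofs are below) =====
def Claim_equal_calc_py : Prop := ∀ (B : String) (x : Int) (y : Int), Dom_calc_py B x y → Spec_calc_py B x y (calc_py B x y)

-- ===== LEMMAS AND PROOFS =====

-- number of indices i with cs[i] = c1, cs[i+1] = c2 (structural pair recursion)
def pvCnt2 (c1 c2 : Char) : List Char → Nat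
  | a :: b :: t => (if a = c1 ∧ b = c2 then 1 else 0) + pvCnt2 c1 c2 (b :: t)
  | _ => 0

-- structural form of stage 1's run collapse: pvAux p l keeps the chars of l that
-- differ from the previous kept char (previous = p initially)
def pvAux (p : Char) : List Char → List Char
  | [] => []
  | b :: t => if b = p then pvAux p t else b :: pvAux b t

-- A's fold over indices, rewritten on the char list and Nat indices, equals the pair counts
theorem pvLoop_eq (cs : List Char) :
    ∀ (x y a : Int),
      (List.range (cs.length - 1)).foldl
        (fun ans k =>
          let ans := if cs[k]? = some 'C' ∧ cs[k+1]? = some 'J' then ans + x else ans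
          if cs[k]? = some 'J' ∧ cs[k+1]? = some 'C' then ans + y else ans) a
      = a + (pvCnt2 'C' 'J' cs : Int) * x + (pvCnt2 'J' 'C' cs : Int) * y := by
  induction cs with
  | nil => intro x y a; simp [pvCnt2]
  | cons c1 t ih =>
    intro x y a
    match t with
    | [] => simp [pvCnt2]
    | c2 :: t' =>
      simp only [List.length_cons, Nat.add_sub_cancel]
      rw [List.range_succ_eq_map, List.foldl_cons, List.foldl_map]
      simp only [List.getElem?_cons_zero, List.getElem?_cons_succ, Option.some.injEq]
      have ih' := ih x y
      simp only [List.length_cons, Nat.add_sub_cancel, List.getElem?_cons_succ] at ih'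
      refine (ih' _).trans ?_
      simp only [pvCnt2]
      push_cast
      by_cases h1 : c1 = 'C' ∧ c2 = 'J' <;> by_cases h2 : c1 = 'J' ∧ c2 = 'C' <;>
        simp [h1, h2] <;> ring

-- stage 1's append-at-end fold equals the structural collapse
theorem pvRuns_eq (l : List Char) :
    ∀ (acc : List Char) (p : Char), acc.getLast? = some p →
      l.foldl (fun runs ch =>
          if runs = [] ∨ runs.getLast? ≠ some ch then runs ++ [ch] else runs) acc
        = acc ++ pvAux p l := by
  induction l with
  | nil => intro acc p _; simp [pvAux]
  | cons b t ih =>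
    intro acc p hp
    have hne : acc ≠ [] := by intro h; rw [h] at hp; simp at hp
    by_cases hb : b = p
    · subst hb
      rw [List.foldl_cons]
      rw [if_neg (by simp [hne, hp])]
      rw [ih acc b hp, pvAux, if_pos rfl]
    · rw [List.foldl_cons]
      rw [if_pos (by right; rw [hp]; simp [Ne.symm hb])]
      rw [ih (acc ++ [b]) b (by simp)]
      rw [pvAux, if_neg hb, List.append_assoc]
      rfl

-- collapsing runs preserves the count of (c1,c2) adjacent pairs when c1 ≠ c2
theorem pvAux_cnt {c1 c2 : Char} (h : c1 ≠ c2) (t : List Char) :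
    ∀ a : Char, pvCnt2 c1 c2 (a :: pvAux a t) = pvCnt2 c1 c2 (a :: t) := by
  induction t with
  | nil => intro a; simp [pvAux]
  | cons b t' ih =>
    intro a
    by_cases hb : b = a
    · subst hb
      rw [pvAux, if_pos rfl, ih b]
      have : ¬ (b = c1 ∧ b = c2) := by rintro ⟨rfl, rfl⟩; exact h rfl
      simp [pvCnt2, this]
    · rw [pvAux, if_neg hb]
      show pvCnt2 c1 c2 (a :: b :: pvAux b t') = _
      rw [pvCnt2, ih b, pvCnt2]

-- stage 2's fold over zip(l, l[1:]) equals the weighted pair counts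
theorem pvPair_eq (x y : Int) : ∀ (l : List Char) (a0 : Int),
    (l.zip l.tail).foldl
      (fun ans p =>
        if p.1 = 'C' ∧ p.2 = 'J' then ans + x
        else if p.1 = 'J' ∧ p.2 = 'C' then ans + y
        else ans) a0
    = a0 + (pvCnt2 'C' 'J' l : Int) * x + (pvCnt2 'J' 'C' l : Int) * y := by
  intro l
  induction l with
  | nil => intro a0; simp [pvCnt2]
  | cons c1 t ih =>
    intro a0
    match t with
    | [] => simp [pvCnt2]
    | c2 :: t' =>
      simp only [List.tail_cons] at ih ⊢
      rw [List.zip_cons_cons, List.foldl_cons]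
      rw [ih]
      simp only [pvCnt2]
      push_cast
      by_cases h1 : c1 = 'C' ∧ c2 = 'J' <;> by_cases h2 : c1 = 'J' ∧ c2 = 'C' <;>
        simp [h1, h2] <;> ring

-- ===== VERDICT (by name: the statement is the Claim_ definition above) =====
theorem calc_py_spec : Claim_equal_calc_py := by
  intro B x y _
  unfold Spec_calc_py calc_py calc_py_alt
  -- A side: reduce to pvCnt2 on B.toList
  rw [PySem.Str.len_eq, PySem.List.pyRange_one]
  rw [show ((B.toList.length : Int) - 1 - 0).toNat = B.toList.length - 1 by omega]
  rw [List.foldl_map]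
  have hc : ∀ k : Nat, ((k : Int) + 1) = ((k + 1 : Nat) : Int) := by intro k; push_cast; ring
  simp only [zero_add]
  simp only [PySem.Str.pyGet?, PySem.Chars.pyGet?, hc, PySem.List.pyGet?_natCast]
  refine (pvLoop_eq B.toList x y 0).trans ?_
  -- B side: runs fold, then zip fold
  rw [PySem.List.slice_from_one]
  match hB : B.toList with
  | [] => simp [pvCnt2]
  | a :: t =>
    rw [List.foldl_cons, if_pos (Or.inl rfl), List.nil_append,
        pvRuns_eq t [a] a (by simp), List.singleton_append]
    rw [pvPair_eq x y (a :: pvAux a t) 0]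
    rw [pvAux_cnt (by decide) t a, pvAux_cnt (by decide) t a]
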